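-- pv_equiv track=rewrite | github.com/hatchingline/JetBrainsAcademy_Tic-Tac-Toc | Tic-Tac-Toe/task/tictactoe/tictactoe.py | user_input_position
-- ===== SOURCE A (Python) =====
-- position = [[1, 3], [2, 3], [3, 3], [1, 2], [2, 2], [3, 2], [1, 1], [2, 1], [3, 1]]
--
-- def user_input_position(x, y):
--     input_coordinate = [int(x), int(y)]
--     count = 0
--     for _ in position:
--         if input_coordinate == _:
--             return count
--         else:
--             count += 1
-- ===== SOURCE B (Python) =====
-- position = [[1, 3], [2, 3], [3, 3], [1, 2], [2, 2], [3, 2], [1, 1], [2, 1], [3, 1]]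
--
-- def user_input_position(x, y):
--     ix, iy = int(x), int(y)
--     if 1 <= ix <= 3 and 1 <= iy <= 3:
--         return (ix - 1) + (3 - iy) * 3
--     return None
-- ===== Notes on version B (the rewrite author's own statement) =====
-- stated objective: simpler
-- what changed: Replaces the linear scan over the 9-entry position list with a closed-form arithmetic index (ix-1)+(3-iy)*3 after a range test.
import Mathlib
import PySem

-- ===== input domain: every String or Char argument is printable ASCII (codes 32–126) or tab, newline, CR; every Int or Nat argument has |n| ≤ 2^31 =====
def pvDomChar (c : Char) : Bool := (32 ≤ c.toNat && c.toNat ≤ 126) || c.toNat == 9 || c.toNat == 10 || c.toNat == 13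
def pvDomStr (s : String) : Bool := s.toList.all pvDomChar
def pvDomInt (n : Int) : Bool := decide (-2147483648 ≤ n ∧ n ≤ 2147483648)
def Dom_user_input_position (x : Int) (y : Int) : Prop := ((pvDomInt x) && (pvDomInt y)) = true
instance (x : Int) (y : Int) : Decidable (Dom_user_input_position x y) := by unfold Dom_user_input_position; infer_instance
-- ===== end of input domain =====

-- B replaces A's linear scan over the fixed 9-entry position list with a closed-form index formula (simpler).


-- ===== PORT A =====
-- position list as list of pairs
def pvPosition : List (Int × Int) :=
  [(1, 3), (2, 3), (3, 3), (1, 2), (2, 2), (3, 2), (1, 1), (2, 1), (3, 1)]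

-- scan loop: return count at first match, else increment count
def pvScan (coord : Int × Int) (count : Int) : List (Int × Int) → Option Int
  | [] => none
  | p :: rest => if coord = p then some count else pvScan coord (count + 1) rest

def user_input_position (x : Int) (y : Int) : Option Int :=
  pvScan (x, y) 0 pvPosition

-- ===== PORT B =====
-- closed-form index formula for the 3×3 grid
def user_input_position_alt (x : Int) (y : Int) : Option Int :=
  if 1 ≤ x ∧ x ≤ 3 ∧ 1 ≤ y ∧ y ≤ 3 then some ((x - 1) + (3 - y) * 3) else none

-- ===== PRECONDITION & SPEC =====
def Spec_user_input_position (x : Int) (y : Int) (out : Option Int) : Prop := out = user_input_position_alt x y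
instance (x : Int) (y : Int) (out : Option Int) : Decidable (Spec_user_input_position x y out) := by unfold Spec_user_input_position; infer_instance

-- ===== CLAIM (what is proved, stated in full; the proofs are below) =====
def Claim_equal_user_input_position : Prop := ∀ (x : Int) (y : Int), Dom_user_input_position x y → Spec_user_input_position x y (user_input_position x y)

-- ===== LEMMAS AND PROOFS =====

-- ===== VERDICT (by name: the statement is the Claim_ definition above) =====
theorem user_input_position_spec : Claim_equal_user_input_position := by
  intro x y _
  unfold Spec_user_input_position user_input_position user_input_position_alt pvScan pvPosition
  by_cases hx1 : x = 1 <;> by_cases hx2 : x = 2 <;> by_cases hx3 : x = 3 <;>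
    by_cases hy1 : y = 1 <;> by_cases hy2 : y = 2 <;> by_cases hy3 : y = 3 <;>
    subst_vars <;>
    first
      | decide
      | (rw [if_neg (by omega)]
         simp only [pvScan, Prod.mk.injEq]
         repeat rw [if_neg (by omega)])
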